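-- pv_equiv track=rewrite | github.com/Thoughtful-Lover/TIL | Python/BAEKJOON/240413/8958.py | ox_quiz
-- ===== SOURCE A (Python) =====
-- def ox_quiz(results):
--     # 점수를 저장할 변수 score
--     score = 0
--
--     # 입력 받은 ox 퀴즈의 결과 리스트를 순회하며
--     for i in range(len(results)):
--         # 만약 O라면
--         if results[i] == 'O':
--             # 처음으로 나온 O는 무조건 1점이고 리스트에도 1점을 저장
--             if i == 0:
--                 score += 1
--                 results[i] = 1
--             # 그게 아니라면 바로 앞의 값에서 1을 추가한 값을 점수로 계산하고 리스트에도 저장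
--             else:
--                 score += results[i-1]+1
--                 results[i] = results[i-1]+1
--
--         # 만약 X가 나온 경우라면 리스트에 0점을 저장
--         # 이렇게 하면 O가 연속된 경우 1점씩 추가해서 점수가 저장되고
--         # 바로 앞이 X인 경우에는 1점부터 다시 시작하게 됨
--         else:
--             results[i] = 0
--
--     return score
-- ===== SOURCE B (Python) =====
-- def ox_quiz(results):
--     # Score each maximal run of k consecutive 'O's at once with the closed form
--     # k*(k+1)//2, scanning run by run with two indices (input is not mutated).
--     total = 0
--     i = 0
--     n = len(results)
--     while i < n:
--         if results[i] != 'O':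
--             i += 1
--         else:
--             j = i
--             while j < n and results[j] == 'O':
--                 j += 1
--             k = j - i
--             total += k * (k + 1) // 2
--             i = j
--     return total
-- ===== Notes on version B (the rewrite author's own statement) =====
-- stated objective: alternative
-- what changed: Instead of A's single pass that accumulates a per-element streak via self-reads of the mutated list, B scans the list run by run with two indices and scores each maximal run of k 'O's at once with the closed form k*(k+1)//2; B does not mutate the input (the claim is about the return value only).
import Mathlib
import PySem

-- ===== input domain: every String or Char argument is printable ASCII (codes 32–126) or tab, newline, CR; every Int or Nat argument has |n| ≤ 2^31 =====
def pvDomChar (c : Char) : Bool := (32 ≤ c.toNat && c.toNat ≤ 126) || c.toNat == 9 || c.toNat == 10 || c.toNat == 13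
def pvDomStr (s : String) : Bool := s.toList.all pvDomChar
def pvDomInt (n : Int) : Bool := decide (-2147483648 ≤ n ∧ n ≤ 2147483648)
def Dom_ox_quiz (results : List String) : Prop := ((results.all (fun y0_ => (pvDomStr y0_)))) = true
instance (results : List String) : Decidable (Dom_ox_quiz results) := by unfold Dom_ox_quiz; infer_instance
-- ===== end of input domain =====

-- B scores each maximal run of k consecutive 'O's at once with the closed form k*(k+1)//2,
-- scanning run by run with two indices, instead of A's per-element streak accumulation via
-- self-reads of the mutated list. Same O(n) cost; B does not mutate `results` (A does: the
-- claim is about the return value only).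


-- ===== PORT A =====
-- A's loop body: state = (score, stored) where stored models the prefix of `results`
-- already overwritten with ints; results[i] reads the not-yet-overwritten original string,
-- results[i-1] reads the stored int.
def oxStepA (results : List String) (st : Int × List Int) (i : Int) : Int × List Int :=
  if PySem.List.pyGet? results i = some "O" then
    if i = 0 then (st.1 + 1, st.2 ++ [1])
    else
      let p := (PySem.List.pyGet? st.2 (i - 1)).getD 0
      (st.1 + p + 1, st.2 ++ [p + 1])
  else (st.1, st.2 ++ [0])

def ox_quiz (results : List String) : Int :=
  ((PySem.List.pyRange 0 results.length 1).foldl (oxStepA results) (0, [])).1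

-- ===== PORT B =====
-- B's inner while `while j < n and results[j] == 'O': j += 1`; results[j]? is exact for
-- Python's results[j] here because the guard keeps 0 <= j < n.
def oxInner (results : List String) (j : Nat) : Nat :=
  if h : j < results.length ∧ results[j]? = some "O" then oxInner results (j + 1) else j
termination_by results.length - j
decreasing_by omega

-- termination helper for the outer loop: the inner while never moves j backwards
lemma oxInner_ge (results : List String) (j : Nat) : j ≤ oxInner results j := by
  induction j using oxInner.induct results with
  | case1 j h ih => rw [oxInner, dif_pos h]; omega
  | case2 j h => rw [oxInner, dif_neg h]

-- B's outer while loop, state = (total, i); results[i]? is exact for Python's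
-- results[i] since the guard keeps 0 <= i < n.
def oxOuter (results : List String) (total : Int) (i : Nat) : Int :=
  if hi : i < results.length then
    if results[i]? ≠ some "O" then oxOuter results total (i + 1)
    else
      let j := oxInner results i
      let k := j - i
      oxOuter results (total + PySem.Int.floordiv ((k : Int) * ((k : Int) + 1)) 2) j
  else total
termination_by results.length - i
decreasing_by
  · omega
  · have h1 : oxInner results i = oxInner results (i + 1) := by
      rw [oxInner, dif_pos ⟨hi, by simpa using not_not.mp (by assumption)⟩]
    have h2 := oxInner_ge results (i + 1)
    omega

def ox_quiz_alt (results : List String) : Int :=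
  oxOuter results 0 0

-- ===== PRECONDITION & SPEC =====
def Spec_ox_quiz (results : List String) (out : Int) : Prop := out = ox_quiz_alt results
instance (results : List String) (out : Int) : Decidable (Spec_ox_quiz results out) := by unfold Spec_ox_quiz; infer_instance

-- ===== CLAIM (what is proved, stated in full; the proofs are below) =====
def Claim_equal_ox_quiz : Prop := ∀ (results : List String), Dom_ox_quiz results → Spec_ox_quiz results (ox_quiz results)

-- ===== LEMMAS AND PROOFS =====

-- Common model: the list of streak values A writes into `results`, starting from streak c.
def streaks (c : Int) : List String → List Int
  | [] => []
  | x :: xs => if x = "O" then (c + 1) :: streaks (c + 1) xs else 0 :: streaks 0 xs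

-- Triangular numbers, the run score.
def oxLead : List String → Nat
  | [] => 0
  | x :: xs => if x = "O" then 1 + oxLead xs else 0

lemma oxLead_cons_O (rest : List String) : oxLead ("O" :: rest) = 1 + oxLead rest := by
  simp [oxLead]

def triT : Nat → Int
  | 0 => 0
  | k + 1 => triT k + (k + 1)

lemma streaks_length (xs : List String) (c : Int) : (streaks c xs).length = xs.length := by
  induction xs generalizing c with
  | nil => rfl
  | cons x xs ih => by_cases h : x = "O" <;> simp [streaks, h, ih]

lemma getLast?_getD_cons (a d : Int) (l : List Int) :
    ((a :: l).getLast?).getD d = l.getLast?.getD a := by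
  induction l generalizing a d with
  | nil => simp
  | cons b t ih => rw [List.getLast?_cons_cons, ih b d, ih b a]

lemma streaks_append_singleton (xs : List String) (y : String) (c : Int) :
    streaks c (xs ++ [y]) =
      streaks c xs ++ [if y = "O" then (streaks c xs).getLastD c + 1 else 0] := by
  induction xs generalizing c with
  | nil => by_cases h : y = "O" <;> simp [streaks, h]
  | cons x xs ih =>
    by_cases h : x = "O" <;> simp [streaks, h, ih, List.getLastD_eq_getLast?, getLast?_getD_cons]

lemma two_mul_triT (k : Nat) : 2 * triT k = (k : Int) * ((k : Int) + 1) := by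
  induction k with
  | zero => simp [triT]
  | succ m ih => simp only [triT]; push_cast; push_cast at ih; ring_nf; ring_nf at ih; omega

lemma floordiv_triT (k : Nat) :
    PySem.Int.floordiv ((k : Int) * ((k : Int) + 1)) 2 = triT k := by
  rw [PySem.Int.floordiv_eq_ediv_of_pos (by omega), ← two_mul_triT k]
  exact Int.mul_ediv_cancel_left _ (by norm_num)

lemma streaks_sum_run (xs : List String) (c : Int) :
    (streaks c xs).sum =
      c * (oxLead xs : Int) + triT (oxLead xs) + (streaks 0 (xs.drop (oxLead xs))).sum := by
  induction xs generalizing c with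
  | nil => simp [streaks, oxLead, triT]
  | cons x xs ih =>
    by_cases h : x = "O"
    · subst h
      have hs : streaks c ("O" :: xs) = (c + 1) :: streaks (c + 1) xs := by simp [streaks]
      have hd : List.drop (1 + oxLead xs) ("O" :: xs) = List.drop (oxLead xs) xs := by
        rw [Nat.add_comm, List.drop_succ_cons]
      have ht : triT (1 + oxLead xs) = triT (oxLead xs) + (oxLead xs + 1) := by
        rw [Nat.add_comm, triT]
      rw [hs, oxLead_cons_O, hd, List.sum_cons, ih (c + 1), ht]
      push_cast
      ring
    · simp [streaks, oxLead, h, triT]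

lemma oxLead_drop (results : List String) (j : Nat) (hj : j < results.length)
    (hO : results[j]? = some "O") :
    oxLead (results.drop j) = 1 + oxLead (results.drop (j + 1)) := by
  have hd : results.drop j = results[j] :: results.drop (j + 1) :=
    List.drop_eq_getElem_cons hj
  have hO' : results[j] = "O" := by
    simpa [List.getElem?_eq_getElem hj] using hO
  rw [hd, hO', oxLead_cons_O]

lemma oxInner_eq (results : List String) (j : Nat) :
    oxInner results j = j + oxLead (results.drop j) := by
  induction j using oxInner.induct results with
  | case1 j h ih =>
    rw [oxInner, dif_pos h, ih, oxLead_drop results j h.1 h.2]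
    omega
  | case2 j h =>
    rw [oxInner, dif_neg h]
    rcases Nat.lt_or_ge j results.length with hj | hj
    · have hne : ¬ results[j]? = some "O" := fun hO => h ⟨hj, hO⟩
      have hd : results.drop j = results[j] :: results.drop (j + 1) :=
        List.drop_eq_getElem_cons hj
      rw [List.getElem?_eq_getElem hj, Option.some.injEq] at hne
      rw [hd]
      simp [oxLead, hne]
    · rw [List.drop_eq_nil_of_le hj]
      simp [oxLead]

lemma oxOuter_eq (results : List String) (total : Int) (i : Nat) :
    oxOuter results total i = total + (streaks 0 (results.drop i)).sum := by
  induction total, i using oxOuter.induct results with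
  | case1 total i hi hne ih =>
    have hd : results.drop i = results[i] :: results.drop (i + 1) :=
      List.drop_eq_getElem_cons hi
    have hne' : ¬ results[i] = "O" := by
      simpa [List.getElem?_eq_getElem hi] using hne
    rw [oxOuter, dif_pos hi, if_pos hne, ih, hd]
    simp [streaks, hne']
  | case2 total i hi hO j k ih =>
    have hO' : results[i]? = some "O" := by simpa using not_not.mp hO
    have hrun := streaks_sum_run (results.drop i) 0
    have hj : oxInner results i = i + oxLead (results.drop i) := oxInner_eq results i
    rw [oxOuter, dif_pos hi, if_neg hO, ih]
    have hkk : k = j - i := rfl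
    have hjj : j = oxInner results i := rfl
    rw [hkk, hjj]
    rw [List.drop_drop] at hrun
    have hk : oxInner results i - i = oxLead (results.drop i) := by omega
    rw [hk, hj, floordiv_triT, hrun]
    ring
  | case3 total i hi =>
    rw [oxOuter, dif_neg hi, List.drop_eq_nil_of_le (by omega)]
    simp [streaks]

lemma alt_eq_streaks_sum (xs : List String) : ox_quiz_alt xs = (streaks 0 xs).sum := by
  rw [ox_quiz_alt, oxOuter_eq]
  simp

-- A's invariant: after processing indices [0, n), the score is the sum of the streak
-- values written so far and the stored prefix is exactly those streak values.
lemma ox_invA (results : List String) (n : Nat) (hn : n ≤ results.length) :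
    (PySem.List.pyRange 0 n 1).foldl (oxStepA results) (0, []) =
      ((streaks 0 (results.take n)).sum, streaks 0 (results.take n)) := by
  induction n with
  | zero => simp [streaks]
  | succ m ih =>
    have hm : m < results.length := by omega
    have hfold := ih (by omega)
    have hsplit : PySem.List.pyRange 0 ((m : Nat) + 1 : Nat) 1
        = PySem.List.pyRange 0 (m : Int) 1 ++ [(m : Int)] := by
      have : ((m + 1 : Nat) : Int) = (m : Int) + 1 := by push_cast; ring
      rw [this]
      exact PySem.List.pyRange_one_succ_right (by positivity)
    have htake : results.take (m + 1) = results.take m ++ [results[m]] := by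
      rw [List.take_add_one, List.getElem?_eq_getElem hm]; rfl
    have hpg : PySem.List.pyGet? results (m : Int) = some results[m] := by
      rw [PySem.List.pyGet?_natCast, List.getElem?_eq_getElem hm]
    set L := streaks 0 (results.take m) with hL
    have hLlen : L.length = m := by
      rw [hL, streaks_length, List.length_take]; omega
    rw [hsplit, List.foldl_append, hfold, htake, streaks_append_singleton]
    by_cases hc : results[m] = "O"
    · by_cases hm0 : m = 0
      · subst hm0
        have hpg0 : PySem.List.pyGet? results 0 = some results[0] := by simpa using hpg
        simp [oxStepA, hpg0, hc]
        refine ⟨?_, ?_, ?_⟩ <;> simp [hL, streaks]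
      · have hLne : L ≠ [] := by intro h; rw [h] at hLlen; simp at hLlen; omega
        have hidx : ((m : Int) - 1) = ((m - 1 : Nat) : Int) := by omega
        have hget : PySem.List.pyGet? L ((m : Int) - 1) = L.getLast? := by
          rw [hidx, PySem.List.pyGet?_natCast, List.getLast?_eq_getElem?, hLlen]
        obtain ⟨x, hx⟩ : ∃ x, L.getLast? = some x :=
          Option.isSome_iff_exists.mp (List.getLast?_isSome.mpr hLne)
        have hxD : L.getLastD 0 = x := by rw [List.getLastD_eq_getLast?, hx]; rfl
        have hm0' : (m : Int) ≠ 0 := by exact_mod_cast hm0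
        rw [← hL, List.foldl_cons, List.foldl_nil]
        simp only [oxStepA, hpg, hc, if_neg hm0', hget, hx, Option.getD_some,
          hxD, List.sum_append, List.sum_cons, List.sum_nil, reduceIte, Prod.mk.injEq]
        exact ⟨by ring, trivial⟩
    · rw [← hL, List.foldl_cons, List.foldl_nil]
      simp [oxStepA, hpg, hc]

-- ===== VERDICT (by name: the statement is the Claim_ definition above) =====
theorem ox_quiz_spec : Claim_equal_ox_quiz := by
  intro results _
  unfold Spec_ox_quiz ox_quiz
  rw [ox_invA results results.length le_rfl]
  simp [alt_eq_streaks_sum]
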